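-- pv_equiv track=rewrite | github.com/YeolJ00/Melon-mp3-Cleaner | MelonCleaner1.0.py | find_delete_target
-- ===== SOURCE A (Python) =====
-- def find_delete_target(mu_list):
--     target = []
--     for n1 in range(len(mu_list)):
--         for n2 in range(n1+1, len(mu_list)):
--             if mu_list[n1][3:] == mu_list[n2][3:]:
--                 target.append(mu_list[n2])
--                 break
--     return target
-- ===== SOURCE B (Python) =====
-- def find_delete_target(mu_list):
--     # One right-to-left pass: a dict maps each suffix key (s[3:]) to the
--     # nearest index on the right where it occurs, so each element's "next
--     # duplicate" is a single lookup instead of an inner scan.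
--     seen = {}
--     out = []
--     for i in range(len(mu_list) - 1, -1, -1):
--         key = mu_list[i][3:]
--         j = seen.get(key)
--         if j is not None:
--             out.append(mu_list[j])
--         seen[key] = i
--     out.reverse()
--     return out
-- ===== Notes on version B (the rewrite author's own statement) =====
-- stated objective: faster
-- what changed: Replaces the quadratic inner scan for the next element with an equal suffix key by a single right-to-left pass maintaining a dict from suffix key to its nearest occurrence index on the right.
import Mathlib
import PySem

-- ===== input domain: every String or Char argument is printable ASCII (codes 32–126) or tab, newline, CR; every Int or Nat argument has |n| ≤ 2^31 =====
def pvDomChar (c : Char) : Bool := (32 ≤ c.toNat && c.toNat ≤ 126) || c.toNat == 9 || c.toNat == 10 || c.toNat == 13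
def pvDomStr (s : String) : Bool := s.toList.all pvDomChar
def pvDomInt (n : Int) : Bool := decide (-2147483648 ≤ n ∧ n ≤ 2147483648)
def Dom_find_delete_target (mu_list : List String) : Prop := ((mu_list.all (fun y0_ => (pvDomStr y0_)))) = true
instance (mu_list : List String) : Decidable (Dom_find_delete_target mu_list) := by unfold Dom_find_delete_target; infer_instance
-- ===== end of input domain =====

-- B replaces A's quadratic inner scan by one right-to-left pass with a dict
-- from suffix key to its nearest occurrence index on the right (faster).

-- ===== PORT A =====
def find_delete_target (mu_list : List String) : List String :=
  (PySem.List.pyRange 0 (mu_list.length : Int) 1).foldl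
    (fun target n1 =>
      match (PySem.List.pyRange (n1 + 1) (mu_list.length : Int) 1).find?
          (fun n2 => PySem.Str.slice (PySem.List.pyGetD mu_list n1 "") (some 3) none
                   == PySem.Str.slice (PySem.List.pyGetD mu_list n2 "") (some 3) none) with
      | some n2 => target ++ [PySem.List.pyGetD mu_list n2 ""]
      | none => target)
    []

-- ===== PORT B =====
def find_delete_target_alt (mu_list : List String) : List String :=
  ((PySem.List.pyRange ((mu_list.length : Int) - 1) (-1) (-1)).foldl
    (fun (st : List String × PySem.Dict String Int) i =>
      let key := PySem.Str.slice (PySem.List.pyGetD mu_list i "") (some 3) none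
      match st.2.get? key with
      | some j => (st.1 ++ [PySem.List.pyGetD mu_list j ""], st.2.insert key i)
      | none => (st.1, st.2.insert key i))
    ([], PySem.Dict.empty)).1.reverse

-- ===== PRECONDITION & SPEC =====
def Spec_find_delete_target (mu_list : List String) (out : List String) : Prop := out = find_delete_target_alt mu_list
instance (mu_list : List String) (out : List String) : Decidable (Spec_find_delete_target mu_list out) := by unfold Spec_find_delete_target; infer_instance

-- ===== CLAIM (what is proved, stated in full; the proofs are below) =====
def Claim_equal_find_delete_target : Prop := ∀ (mu_list : List String), Dom_find_delete_target mu_list → Spec_find_delete_target mu_list (find_delete_target mu_list)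

-- ===== LEMMAS AND PROOFS =====

-- suffix key of the element at index i (the Python mu_list[i][3:])
def fdtKey (l : List String) (i : Int) : String :=
  PySem.Str.slice (PySem.List.pyGetD l i "") (some 3) none

-- the contribution of index i: the element at the first later index with the same key, if any
def fdtG (l : List String) (i : Int) : List String :=
  match (PySem.List.pyRange (i + 1) (l.length : Int) 1).find?
      (fun j => fdtKey l j == fdtKey l i) with
  | some j => [PySem.List.pyGetD l j ""]
  | none => []

lemma find_delete_target_eq_flatMap (l : List String) :
    find_delete_target l = (PySem.List.pyRange 0 (l.length : Int) 1).flatMap (fdtG l) := by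
  unfold find_delete_target
  have hstep : ∀ (acc : List String) (n1 : Int),
      (match (PySem.List.pyRange (n1 + 1) (l.length : Int) 1).find?
          (fun n2 => PySem.Str.slice (PySem.List.pyGetD l n1 "") (some 3) none
                   == PySem.Str.slice (PySem.List.pyGetD l n2 "") (some 3) none) with
        | some n2 => acc ++ [PySem.List.pyGetD l n2 ""]
        | none => acc)
      = acc ++ fdtG l n1 := by
    intro acc n1
    have hpred : (fun n2 => PySem.Str.slice (PySem.List.pyGetD l n1 "") (some 3) none
                   == PySem.Str.slice (PySem.List.pyGetD l n2 "") (some 3) none)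
        = (fun j => fdtKey l j == fdtKey l n1) := by
      funext j
      simp [fdtKey, BEq.comm]
    rw [hpred]
    unfold fdtG
    cases (PySem.List.pyRange (n1 + 1) (l.length : Int) 1).find?
        (fun j => fdtKey l j == fdtKey l n1) with
    | none => simp
    | some j => simp
  calc (PySem.List.pyRange 0 (l.length : Int) 1).foldl
        (fun target n1 =>
          match (PySem.List.pyRange (n1 + 1) (l.length : Int) 1).find?
              (fun n2 => PySem.Str.slice (PySem.List.pyGetD l n1 "") (some 3) none
                       == PySem.Str.slice (PySem.List.pyGetD l n2 "") (some 3) none) with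
          | some n2 => target ++ [PySem.List.pyGetD l n2 ""]
          | none => target) []
      = (PySem.List.pyRange 0 (l.length : Int) 1).foldl
          (fun target n1 => target ++ fdtG l n1) [] := by
        apply PySem.List.foldl_congr_mem
        intro acc x _
        exact hstep acc x
    _ = [] ++ (PySem.List.pyRange 0 (l.length : Int) 1).flatMap (fdtG l) :=
        PySem.List.foldl_append_eq_flatMap _ _ _
    _ = (PySem.List.pyRange 0 (l.length : Int) 1).flatMap (fdtG l) := by simp

-- B's loop step (the literal lambda of the port, named for the proofs)
def fdtStep (l : List String) (st : List String × PySem.Dict String Int) (i : Int) :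
    List String × PySem.Dict String Int :=
  match st.2.get? (fdtKey l i) with
  | some j => (st.1 ++ [PySem.List.pyGetD l j ""], st.2.insert (fdtKey l i) i)
  | none => (st.1, st.2.insert (fdtKey l i) i)

lemma fdt_loop (l : List String) (n : Nat) :
    ∀ m : Int, 0 ≤ m → ((l.length : Int) - m).toNat = n →
    (((PySem.List.pyRange m (l.length : Int) 1).reverse).foldl (fdtStep l)
        ([], PySem.Dict.empty)).1
      = ((PySem.List.pyRange m (l.length : Int) 1).flatMap (fdtG l)).reverse
    ∧ ∀ k : String,
      (((PySem.List.pyRange m (l.length : Int) 1).reverse).foldl (fdtStep l)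
          ([], PySem.Dict.empty)).2.get? k
        = (PySem.List.pyRange m (l.length : Int) 1).find? (fun j => fdtKey l j == k) := by
  induction n with
  | zero =>
    intro m _ hn
    have hnil : PySem.List.pyRange m (l.length : Int) 1 = [] :=
      PySem.List.pyRange_one_eq_nil (by omega)
    simp [hnil, PySem.Dict.get?_empty]
  | succ n ih =>
    intro m hm hn
    have hlt : m < (l.length : Int) := by omega
    have hcons := PySem.List.pyRange_one_cons (a := m) (b := (l.length : Int)) hlt
    obtain ⟨ih1, ih2⟩ := ih (m + 1) (by omega) (by omega)
    have hfold : ((PySem.List.pyRange m (l.length : Int) 1).reverse).foldl (fdtStep l)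
        ([], PySem.Dict.empty)
      = fdtStep l
          (((PySem.List.pyRange (m + 1) (l.length : Int) 1).reverse).foldl (fdtStep l)
            ([], PySem.Dict.empty)) m := by
      rw [hcons]
      simp [List.foldl_append]
    set st := ((PySem.List.pyRange (m + 1) (l.length : Int) 1).reverse).foldl (fdtStep l)
        ([], PySem.Dict.empty) with hst
    have hget : st.2.get? (fdtKey l m)
        = (PySem.List.pyRange (m + 1) (l.length : Int) 1).find?
            (fun j => fdtKey l j == fdtKey l m) := ih2 (fdtKey l m)
    constructor
    · rw [hfold, hcons]
      unfold fdtStep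
      rw [hget]
      cases hc : (PySem.List.pyRange (m + 1) (l.length : Int) 1).find?
          (fun j => fdtKey l j == fdtKey l m) with
      | none =>
        have hg : fdtG l m = [] := by simp [fdtG, hc]
        simp [List.flatMap_cons, hg, ih1]
      | some j =>
        have hg : fdtG l m = [PySem.List.pyGetD l j ""] := by simp [fdtG, hc]
        simp [List.flatMap_cons, hg, ih1]
    · intro k
      rw [hfold, hcons]
      unfold fdtStep
      rw [hget]
      have hins : ∀ k', (st.2.insert (fdtKey l m) m).get? k'
          = if k' = fdtKey l m then some m else st.2.get? k' :=
        fun k' => PySem.Dict.get?_insert _ _ _ _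
      cases hc : (PySem.List.pyRange (m + 1) (l.length : Int) 1).find?
          (fun j => fdtKey l j == fdtKey l m) with
      | none =>
        rw [hins k, ih2 k, List.find?_cons]
        by_cases hk : k = fdtKey l m
        · subst hk; simp
        · have hbk : (fdtKey l m == k) = false := by
            rw [beq_eq_false_iff_ne]; exact fun h => hk h.symm
          simp [hk, hbk]
      | some j =>
        rw [hins k, ih2 k, List.find?_cons]
        by_cases hk : k = fdtKey l m
        · subst hk; simp
        · have hbk : (fdtKey l m == k) = false := by
            rw [beq_eq_false_iff_ne]; exact fun h => hk h.symm
          simp [hk, hbk]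

lemma find_delete_target_alt_eq_flatMap (l : List String) :
    find_delete_target_alt l = (PySem.List.pyRange 0 (l.length : Int) 1).flatMap (fdtG l) := by
  unfold find_delete_target_alt
  have hrev : PySem.List.pyRange ((l.length : Int) - 1) (-1) (-1)
      = (PySem.List.pyRange 0 (l.length : Int) 1).reverse := by
    rw [PySem.List.pyRange_neg_one_eq_reverse]
    norm_num
  rw [hrev]
  have h := (fdt_loop l l.length 0 (by omega) (by omega)).1
  have hstep : (fun (st : List String × PySem.Dict String Int) i =>
      let key := PySem.Str.slice (PySem.List.pyGetD l i "") (some 3) none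
      match st.2.get? key with
      | some j => (st.1 ++ [PySem.List.pyGetD l j ""], st.2.insert key i)
      | none => (st.1, st.2.insert key i)) = fdtStep l := rfl
  rw [hstep]
  rw [h]
  simp

-- ===== VERDICT (by name: the statement is the Claim_ definition above) =====
theorem find_delete_target_spec : Claim_equal_find_delete_target := by
  intro mu_list _
  unfold Spec_find_delete_target
  rw [find_delete_target_eq_flatMap, find_delete_target_alt_eq_flatMap]
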